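-- pv_equiv track=rewrite | github.com/Rainy000/common_tools | utils/files.py | is_file
-- ===== SOURCE A (Python) =====
-- IMG_EXTENSIONS = ('.jpg', '.jpeg', '.png', '.ppm', '.bmp', '.pgm', '.tif',
--                   '.tiff', '.webp')
--
-- VIDEO_EXTENSIONS = ('.mp4', '.avi')
--
-- PLAIN_EXTENTIONS = ('.txt',)
--
-- RICH_EXTENTIONS = ('.xml', '.json')
--
-- def is_file(file_name, type):
--     file_name = file_name.lower()
--     if type == 'image':
--         return any(file_name.endswith(ext) for ext in IMG_EXTENSIONS)
--     if type == 'plain':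
--         return any(file_name.endswith(ext) for ext in PLAIN_EXTENTIONS)
--     if type == 'rich':
--         return any(file_name.endswith(ext) for ext in RICH_EXTENTIONS)
--     if type == 'video':
--         return any(file_name.endswith(ext) for ext in VIDEO_EXTENSIONS)
-- ===== SOURCE B (Python) =====
-- _EXT_SETS = {
--     'image': {'jpg', 'jpeg', 'png', 'ppm', 'bmp', 'pgm', 'tif', 'tiff', 'webp'},
--     'plain': {'txt'},
--     'rich': {'xml', 'json'},
--     'video': {'mp4', 'avi'},
-- }
--
-- def is_file(file_name, type):
--     exts = _EXT_SETS.get(type)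
--     if exts is None:
--         return None
--     _head, sep, tail = file_name.lower().rpartition('.')
--     return bool(sep) and tail in exts
-- ===== Notes on version B (the rewrite author's own statement) =====
-- stated objective: alternative
-- what changed: Instead of A's per-extension endswith loop in each branch of an if-chain, B extracts the extension once with rpartition('.') and tests membership of that single extension in a per-type set looked up from a dispatch table; correct because no extension contains an inner dot, so ending with '.ext' is the same as the text after the last dot equalling 'ext'.
import Mathlib
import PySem

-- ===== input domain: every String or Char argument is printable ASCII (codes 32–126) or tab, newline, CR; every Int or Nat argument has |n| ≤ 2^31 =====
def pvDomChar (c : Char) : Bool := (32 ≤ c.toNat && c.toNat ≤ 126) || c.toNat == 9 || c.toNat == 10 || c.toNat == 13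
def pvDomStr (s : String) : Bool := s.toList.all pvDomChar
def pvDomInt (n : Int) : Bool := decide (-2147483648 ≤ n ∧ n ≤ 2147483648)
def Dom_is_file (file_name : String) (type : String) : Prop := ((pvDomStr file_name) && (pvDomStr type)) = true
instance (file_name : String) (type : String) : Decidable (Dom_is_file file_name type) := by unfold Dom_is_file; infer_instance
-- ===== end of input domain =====

-- B uses a different algorithm: instead of A's per-extension suffix tests (an any()-loop
-- of endswith per branch), B extracts the extension once with rpartition('.') and tests
-- membership of that extension in a per-type set looked up from a dispatch table.

-- ===== PORT A =====
def IMG_EXTENSIONS : List String :=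
  [".jpg", ".jpeg", ".png", ".ppm", ".bmp", ".pgm", ".tif", ".tiff", ".webp"]
def VIDEO_EXTENSIONS : List String := [".mp4", ".avi"]
def PLAIN_EXTENTIONS : List String := [".txt"]
def RICH_EXTENTIONS : List String := [".xml", ".json"]

def is_file (file_name : String) (type : String) : Option Bool :=
  let file_name := PySem.Str.lower file_name
  if type == "image" then
    some (IMG_EXTENSIONS.any (fun ext => PySem.Str.endswith file_name ext))
  else if type == "plain" then
    some (PLAIN_EXTENTIONS.any (fun ext => PySem.Str.endswith file_name ext))
  else if type == "rich" then
    some (RICH_EXTENTIONS.any (fun ext => PySem.Str.endswith file_name ext))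
  else if type == "video" then
    some (VIDEO_EXTENSIONS.any (fun ext => PySem.Str.endswith file_name ext))
  else none

-- ===== PORT B =====
def pvExtSets : PySem.Dict String (PySem.Set String) :=
  PySem.Dict.ofList
    [("image", PySem.Set.ofList ["jpg", "jpeg", "png", "ppm", "bmp", "pgm", "tif", "tiff", "webp"]),
     ("plain", PySem.Set.ofList ["txt"]),
     ("rich",  PySem.Set.ofList ["xml", "json"]),
     ("video", PySem.Set.ofList ["mp4", "avi"])]

-- hand port of s.rpartition('.') (PySem has no rpartition): scan from the end via
-- reverse + takeWhile/dropWhile; exact — returns (head, sep, tail), sep = [] iff no '.'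
def pvRPartitionDot (l : List Char) : List Char × List Char × List Char :=
  let r := l.reverse
  if '.' ∈ r then
    (((r.dropWhile (fun c => !(c == '.'))).tail).reverse, ['.'],
     (r.takeWhile (fun c => !(c == '.'))).reverse)
  else ([], [], l)

def is_file_alt (file_name : String) (type : String) : Option Bool :=
  match pvExtSets.get? type with
  | none => none
  | some exts =>
    let p := pvRPartitionDot (PySem.Str.lower file_name).toList
    some (decide (p.2.1 ≠ []) && PySem.Set.contains exts (String.ofList p.2.2))

-- ===== PRECONDITION & SPEC =====
def Spec_is_file (file_name : String) (type : String) (out : Option Bool) : Prop := out = is_file_alt file_name type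
instance (file_name : String) (type : String) (out : Option Bool) : Decidable (Spec_is_file file_name type out) := by unfold Spec_is_file; infer_instance

-- ===== CLAIM (what is proved, stated in full; the proofs are below) =====
def Claim_equal_is_file : Prop := ∀ (file_name : String) (type : String), Dom_is_file file_name type → Spec_is_file file_name type (is_file file_name type)

-- ===== LEMMAS AND PROOFS =====

theorem pvExtSets_items : pvExtSets = PySem.Dict.mk
    [("image", ["jpg", "jpeg", "png", "ppm", "bmp", "pgm", "tif", "tiff", "webp"]),
     ("plain", ["txt"]),
     ("rich",  ["xml", "json"]),
     ("video", ["mp4", "avi"])] := by decide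

-- suffix test against '.'-prefixed dot-free extension ⟺ the last-dot tail equals it
theorem pv_endswith_eq (L e : List Char) (h : '.' ∉ e) :
    PySem.Chars.endswith L ('.' :: e) =
      (decide ('.' ∈ L.reverse) &&
        decide ((L.reverse.takeWhile (fun c => !(c == '.'))).reverse = e)) := by
  rw [Bool.eq_iff_iff]
  simp only [Bool.and_eq_true, decide_eq_true_eq]
  rw [PySem.Chars.endswith_iff]
  constructor
  · intro hs
    have hp : ('.' :: e).reverse <+: L.reverse := List.reverse_prefix.mpr hs
    rw [List.reverse_cons] at hp
    obtain ⟨t, ht⟩ := hp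
    rw [List.append_assoc, List.singleton_append] at ht
    constructor
    · rw [← ht]; simp
    · rw [← ht, List.takeWhile_append_of_pos]
      · simp
      · intro a ha
        simp only [Bool.not_eq_eq_eq_not, Bool.not_true, beq_eq_false_iff_ne, ne_eq]
        intro hq; exact h (hq ▸ List.mem_reverse.mp ha)
  · rintro ⟨hdot, htw⟩
    have hne : L.reverse.dropWhile (fun c => !(c == '.')) ≠ [] := by
      intro h0
      rw [List.dropWhile_eq_nil_iff] at h0
      have := h0 '.' hdot
      simp at this
    have hhead := List.head_dropWhile_not (fun c => !(c == '.')) hne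
    have hheadEq : (L.reverse.dropWhile (fun c => !(c == '.'))).head hne = '.' := by
      simpa using hhead
    have hsplit : L.reverse =
        L.reverse.takeWhile (fun c => !(c == '.')) ++
          ('.' :: (L.reverse.dropWhile (fun c => !(c == '.'))).tail) := by
      have hd : L.reverse.dropWhile (fun c => !(c == '.')) =
          '.' :: (L.reverse.dropWhile (fun c => !(c == '.'))).tail := by
        conv_lhs => rw [← List.cons_head_tail hne]
        rw [hheadEq]
      exact (List.takeWhile_append_dropWhile
        (p := fun c => !(c == '.')) (l := L.reverse)).symm.trans (by conv_lhs => rw [hd])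
    have htw' : L.reverse.takeWhile (fun c => !(c == '.')) = e.reverse := by
      rw [← htw, List.reverse_reverse]
    rw [← List.reverse_prefix, List.reverse_cons]
    exact ⟨(L.reverse.dropWhile (fun c => !(c == '.'))).tail, by
      rw [List.append_assoc, List.singleton_append, ← htw', ← hsplit]⟩

-- turn 'String.ofList t = lit' into a list equation
theorem pv_ofList_eq (t : List Char) (s : String) : (String.ofList t = s) = (t = s.toList) := by
  apply propext
  constructor
  · intro h; rw [← h, String.toList_ofList]
  · intro h; rw [h, String.ofList_toList]

-- ===== VERDICT (by name: the statement is the Claim_ definition above) =====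
theorem is_file_spec : Claim_equal_is_file := by
  intro file_name type _
  unfold Spec_is_file is_file is_file_alt
  rw [pvExtSets_items]
  by_cases h0 : type = "image"
  · subst h0
    by_cases hdot : '.' ∈ PySem.Chars.lower file_name.toList
    all_goals
      simp [IMG_EXTENSIONS, PySem.Str.endswith_eq, pv_endswith_eq, hdot,
        pvRPartitionDot, PySem.Set.contains, pv_ofList_eq, PySem.Dict.get?_mk_cons,
        show (".jpg").toList = '.' :: ['j','p','g'] from rfl,
        show ("jpg").toList = ['j','p','g'] from rfl,
        show (".jpeg").toList = '.' :: ['j','p','e','g'] from rfl,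
        show ("jpeg").toList = ['j','p','e','g'] from rfl,
        show (".png").toList = '.' :: ['p','n','g'] from rfl,
        show ("png").toList = ['p','n','g'] from rfl,
        show (".ppm").toList = '.' :: ['p','p','m'] from rfl,
        show ("ppm").toList = ['p','p','m'] from rfl,
        show (".bmp").toList = '.' :: ['b','m','p'] from rfl,
        show ("bmp").toList = ['b','m','p'] from rfl,
        show (".pgm").toList = '.' :: ['p','g','m'] from rfl,
        show ("pgm").toList = ['p','g','m'] from rfl,
        show (".tif").toList = '.' :: ['t','i','f'] from rfl,
        show ("tif").toList = ['t','i','f'] from rfl,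
        show (".tiff").toList = '.' :: ['t','i','f','f'] from rfl,
        show ("tiff").toList = ['t','i','f','f'] from rfl,
        show (".webp").toList = '.' :: ['w','e','b','p'] from rfl,
        show ("webp").toList = ['w','e','b','p'] from rfl]
  by_cases h1 : type = "plain"
  · subst h1
    by_cases hdot : '.' ∈ PySem.Chars.lower file_name.toList
    all_goals
      simp [PLAIN_EXTENTIONS, PySem.Str.endswith_eq, pv_endswith_eq, hdot,
        pvRPartitionDot, PySem.Set.contains, pv_ofList_eq, PySem.Dict.get?_mk_cons,
        show (".txt").toList = '.' :: ['t','x','t'] from rfl,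
        show ("txt").toList = ['t','x','t'] from rfl]
  by_cases h2 : type = "rich"
  · subst h2
    by_cases hdot : '.' ∈ PySem.Chars.lower file_name.toList
    all_goals
      simp [RICH_EXTENTIONS, PySem.Str.endswith_eq, pv_endswith_eq, hdot,
        pvRPartitionDot, PySem.Set.contains, pv_ofList_eq, PySem.Dict.get?_mk_cons,
        show (".xml").toList = '.' :: ['x','m','l'] from rfl,
        show ("xml").toList = ['x','m','l'] from rfl,
        show (".json").toList = '.' :: ['j','s','o','n'] from rfl,
        show ("json").toList = ['j','s','o','n'] from rfl]
  by_cases h3 : type = "video"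
  · subst h3
    by_cases hdot : '.' ∈ PySem.Chars.lower file_name.toList
    all_goals
      simp [VIDEO_EXTENSIONS, PySem.Str.endswith_eq, pv_endswith_eq, hdot,
        pvRPartitionDot, PySem.Set.contains, pv_ofList_eq, PySem.Dict.get?_mk_cons,
        show (".mp4").toList = '.' :: ['m','p','4'] from rfl,
        show ("mp4").toList = ['m','p','4'] from rfl,
        show (".avi").toList = '.' :: ['a','v','i'] from rfl,
        show ("avi").toList = ['a','v','i'] from rfl]
  simp [PySem.Dict.get?, h0, h1, h2, h3,
    Ne.symm h0, Ne.symm h1, Ne.symm h2, Ne.symm h3]
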